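-- pv_equiv track=rewrite | github.com/jay-fibi/login_screen | palindrome.py | generate_first_n_palindromes
-- ===== SOURCE A (Python) =====
-- def is_palindrome(n):
--     """Check if a number is a palindrome."""
--     s = str(n)
--     return s == s[::-1]
--
-- def generate_first_n_palindromes(n):
--     """Generate the first N palindrome numbers."""
--     palindromes = []
--     num = 1
--     while len(palindromes) < n:
--         if is_palindrome(num):
--             palindromes.append(num)
--         num += 1
--     return palindromes
-- ===== SOURCE B (Python) =====
-- def generate_first_n_palindromes(n):
--     """Generate the first N palindrome numbers by mirroring numeric prefixes
--     length by length, instead of testing every integer."""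
--     out = []
--     length = 1
--     while len(out) < n:
--         half = (length + 1) // 2
--         for prefix in range(10 ** (half - 1), 10 ** half):
--             m = prefix // 10 ** (2 * half - length)
--             r = 0
--             while m > 0:
--                 r = r * 10 + m % 10
--                 m //= 10
--             out.append(prefix * 10 ** (length - half) + r)
--         length += 1
--     return out[:n]
-- ===== Notes on version B (the rewrite author's own statement) =====
-- stated objective: faster
-- what changed: Instead of scanning every integer and string-testing each for palindromicity, B constructs the palindromes directly in increasing order by enumerating digit-lengths and mirroring each numeric prefix arithmetically, so only n numbers are ever produced.
import Mathlib
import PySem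

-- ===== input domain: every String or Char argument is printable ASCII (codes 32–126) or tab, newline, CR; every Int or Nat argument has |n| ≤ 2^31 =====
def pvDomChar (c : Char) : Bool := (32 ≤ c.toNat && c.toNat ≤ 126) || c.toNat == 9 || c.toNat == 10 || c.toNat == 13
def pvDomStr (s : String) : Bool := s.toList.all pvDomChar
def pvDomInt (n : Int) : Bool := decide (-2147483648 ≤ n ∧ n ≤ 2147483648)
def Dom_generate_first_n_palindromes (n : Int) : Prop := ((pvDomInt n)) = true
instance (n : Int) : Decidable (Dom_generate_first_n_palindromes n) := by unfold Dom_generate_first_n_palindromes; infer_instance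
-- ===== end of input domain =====

-- B replaces A's scan-every-integer-and-string-test search by direct construction of the
-- palindromes in increasing order (mirroring numeric prefixes length by length): asymptotically faster.

-- ===== PORT A =====
-- is_palindrome(n): s = str(n); return s == s[::-1]
def pvIsPalindrome (n : Int) : Bool :=
  let s := PySem.Int.toStr n
  s == ((PySem.Str.slice? s none none (-1)).getD s)  -- s[::-1]; step -1 never raises, getD never fires

-- the while-loop of A; the fuel argument only makes the recursion structurally total.
-- 100^(n+1)-1 iterations always suffice: the first n palindromes lie below 10^(n+1)-1
-- (pv_count_ge below), so the loop exits through its own `len(palindromes) < n` test,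
-- exactly as the Python does (pv_aloop_eq + the final theorem make this precise).
def pvALoop : Nat → List Int → Int → Int → List Int
  | 0, palindromes, _, _ => palindromes
  | fuel + 1, palindromes, num, n =>
    if (palindromes.length : Int) < n then
      pvALoop fuel (if pvIsPalindrome num then palindromes ++ [num] else palindromes) (num + 1) n
    else palindromes

def generate_first_n_palindromes (n : Int) : List Int :=
  pvALoop (100 ^ (n.toNat + 1) - 1) [] 1 n

-- ===== PORT B =====
-- inner `while m > 0: r = r*10 + m%10; m //= 10` of Source B
def pvRev10 (m r : Int) : Int :=
  if h : 0 < m then pvRev10 (PySem.Int.floordiv m 10) (r * 10 + PySem.Int.mod m 10) else r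
termination_by m.toNat
decreasing_by
  rw [PySem.Int.floordiv_eq_ediv_of_pos (by norm_num)]
  omega

-- body of one outer iteration of Source B: all palindromes of a given digit-length, in order.
-- (`length` is ≥ 1 whenever this is reached, so every exponent is ≥ 0 and `.toNat` is exact.)
def pvBlock (length : Int) : List Int :=
  let half := PySem.Int.floordiv (length + 1) 2
  (PySem.List.pyRange ((10 : Int) ^ (half - 1).toNat) ((10 : Int) ^ half.toNat) 1).map
    (fun pref =>
      pref * (10 : Int) ^ (length - half).toNat +
        pvRev10 (PySem.Int.floordiv pref ((10 : Int) ^ (2 * half - length).toNat)) 0)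

-- the outer while-loop of Source B; fuel n.toNat + 1 is enough since every block is nonempty.
def pvBLoop : Nat → List Int → Int → Int → List Int
  | 0, out, _, _ => out
  | fuel + 1, out, length, n =>
    if (out.length : Int) < n then pvBLoop fuel (out ++ pvBlock length) (length + 1) n
    else out

def generate_first_n_palindromes_alt (n : Int) : List Int :=
  PySem.List.slice (pvBLoop (n.toNat + 1) [] 1 n) none (some n)  -- out[:n]

-- ===== PRECONDITION & SPEC =====
def Spec_generate_first_n_palindromes (n : Int) (out : List Int) : Prop := out = generate_first_n_palindromes_alt n
instance (n : Int) (out : List Int) : Decidable (Spec_generate_first_n_palindromes n out) := by unfold Spec_generate_first_n_palindromes; infer_instance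

-- ===== CLAIM (what is proved, stated in full; the proofs are below) =====
def Claim_equal_generate_first_n_palindromes : Prop := ∀ (n : Int), Dom_generate_first_n_palindromes n → Spec_generate_first_n_palindromes n (generate_first_n_palindromes n)

-- ===== LEMMAS AND PROOFS =====

-- ---- digit-level vocabulary used by the proofs ----
def pvPalNat (m : Nat) : Bool := decide (Nat.digits 10 m = (Nat.digits 10 m).reverse)

def pvMirror (d p : Nat) : Nat :=
  p * 10 ^ (d - (d + 1) / 2) +
    Nat.ofDigits 10 ((Nat.digits 10 (p / 10 ^ (2 * ((d + 1) / 2) - d))).reverse)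

def pvBlockNat (d : Nat) : List Nat :=
  (List.range' (10 ^ ((d + 1) / 2 - 1)) (10 ^ ((d + 1) / 2) - 10 ^ ((d + 1) / 2 - 1))).map (pvMirror d)

-- ---- generic digit facts ----
theorem pv_digitsLen_le {m k : Nat} (h : m < 10 ^ k) : (Nat.digits 10 m).length ≤ k := by
  by_cases hm : m = 0
  · simp [hm]
  · by_contra hk
    have h1 : 10 ^ (Nat.digits 10 m).length ≤ 10 * m := Nat.base_pow_length_digits_le 10 m (by norm_num) hm
    have h2 : 10 * m < 10 ^ (k + 1) := by
      rw [pow_succ]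
      calc 10 * m < 10 * 10 ^ k := by omega
        _ = 10 ^ k * 10 := by ring
    have h3 : 10 ^ (k + 1) ≤ 10 ^ (Nat.digits 10 m).length := Nat.pow_le_pow_right (by norm_num) (by omega)
    omega

theorem pv_digitsLen_eq {m d : Nat} (h1 : 10 ^ (d - 1) ≤ m) (h2 : m < 10 ^ d) (hd : 1 ≤ d) :
    (Nat.digits 10 m).length = d := by
  have hle : (Nat.digits 10 m).length ≤ d := pv_digitsLen_le h2
  have hlt : 10 ^ (d - 1) < 10 ^ (Nat.digits 10 m).length :=
    lt_of_le_of_lt h1 (Nat.lt_base_pow_length_digits (by norm_num))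
  have := (Nat.pow_lt_pow_iff_right (by norm_num : 1 < 10)).mp hlt
  omega

theorem pv_lt_of_digitsLen {m d : Nat} (h : (Nat.digits 10 m).length = d) : m < 10 ^ d := by
  rw [← h]; exact Nat.lt_base_pow_length_digits (by norm_num)

theorem pv_le_of_digitsLen {m d : Nat} (hm : m ≠ 0) (h : (Nat.digits 10 m).length = d) :
    10 ^ (d - 1) ≤ m := by
  have h1 : 10 ^ d ≤ 10 * m := by
    rw [← h]; exact Nat.base_pow_length_digits_le 10 m (by norm_num) hm
  have hd : 1 ≤ d := by
    rw [← h]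
    have : Nat.digits 10 m ≠ [] := Nat.digits_ne_nil_iff_ne_zero.mpr hm
    exact List.length_pos_iff.mpr this
  have h2 : (10:Nat) ^ d = 10 * 10 ^ (d - 1) := by
    rw [← pow_succ']
    congr 1
    omega
  rw [h2] at h1
  exact Nat.le_of_mul_le_mul_left h1 (by norm_num)

theorem pv_getLast_drop {α : Type} (l : List α) (j : Nat) (h : l.drop j ≠ [])
    (h' : l ≠ []) : (l.drop j).getLast h = l.getLast h' := by
  have h1 : l.getLast? = (l.drop j).getLast? := by
    conv_lhs => rw [← List.take_append_drop j l]
    rw [List.getLast?_append, List.getLast?_eq_some_getLast h]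
    simp
  rw [List.getLast?_eq_some_getLast h, List.getLast?_eq_some_getLast h'] at h1
  exact (Option.some_inj.mp h1).symm

theorem pv_digits_div_pow (m j : Nat) :
    Nat.digits 10 (m / 10 ^ j) = (Nat.digits 10 m).drop j := by
  rw [Nat.self_div_pow_eq_ofDigits_drop j m (by norm_num)]
  apply Nat.digits_ofDigits 10 (by norm_num)
  · exact fun l hl => Nat.digits_lt_base (by norm_num) (List.mem_of_mem_drop hl)
  · intro hne
    have hD : Nat.digits 10 m ≠ [] := by
      intro e; rw [e] at hne; simp at hne
    have hm0 : m ≠ 0 := Nat.digits_ne_nil_iff_ne_zero.mp hD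
    rw [pv_getLast_drop _ _ hne hD]
    exact Nat.getLast_digit_ne_zero 10 hm0

-- ---- the mirror construction is exactly the palindromes of each digit-length ----
theorem pv_getLast_append' {α : Type} (l l' : List α) (h : l' ≠ []) (hne : l ++ l' ≠ []) :
    (l ++ l').getLast hne = l'.getLast h := by
  rw [List.getLast_append]
  simp [h]

theorem pv_take_reverse_self {α : Type} (l : List α) (hl : l.length ≤ 1) : l.reverse = l := by
  cases l with
  | nil => rfl
  | cons a t =>
    cases t with
    | nil => rfl
    | cons b t2 => simp at hl

theorem pv_palrev {α : Type} (P : List α) (j : Nat) (htake : (P.take j).reverse = P.take j) :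
    ((P.drop j).reverse ++ P).reverse = (P.drop j).reverse ++ P := by
  have hrev : P.reverse = (P.drop j).reverse ++ P.take j := by
    conv_lhs => rw [← List.take_append_drop j P]
    rw [List.reverse_append, htake]
  calc ((P.drop j).reverse ++ P).reverse
      = P.reverse ++ (P.drop j).reverse.reverse := by rw [List.reverse_append]
    _ = ((P.drop j).reverse ++ P.take j) ++ P.drop j := by rw [List.reverse_reverse, hrev]
    _ = (P.drop j).reverse ++ P := by rw [List.append_assoc, List.take_append_drop]

theorem pv_mirror_digits {d p : Nat} (hd : 1 ≤ d)
    (hlo : 10 ^ ((d + 1) / 2 - 1) ≤ p) (hhi : p < 10 ^ ((d + 1) / 2)) :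
    Nat.digits 10 (pvMirror d p) =
      ((Nat.digits 10 p).drop (2 * ((d + 1) / 2) - d)).reverse ++ Nat.digits 10 p := by
  have hh1 : 1 ≤ (d + 1) / 2 := by omega
  have hhd : (d + 1) / 2 ≤ d := by omega
  have hppos : 0 < (10:Nat) ^ ((d + 1) / 2 - 1) := Nat.pow_pos (by norm_num)
  have hp0 : p ≠ 0 := by omega
  have hlen : (Nat.digits 10 p).length = (d + 1) / 2 := pv_digitsLen_eq hlo hhi hh1
  have hPlt : ∀ x ∈ Nat.digits 10 p, x < 10 := fun x hx => Nat.digits_lt_base (by norm_num) hx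
  have hXlen : (((Nat.digits 10 p).drop (2 * ((d + 1) / 2) - d)).reverse).length = d - (d + 1) / 2 := by
    rw [List.length_reverse, List.length_drop, hlen]; omega
  have key : pvMirror d p =
      Nat.ofDigits 10 (((Nat.digits 10 p).drop (2 * ((d + 1) / 2) - d)).reverse ++ Nat.digits 10 p) := by
    rw [pvMirror, pv_digits_div_pow p (2 * ((d + 1) / 2) - d)]
    rw [Nat.ofDigits_append, Nat.ofDigits_digits, hXlen]
    ring
  rw [key]
  apply Nat.digits_ofDigits 10 (by norm_num)
  · intro l hl
    rcases List.mem_append.mp hl with h1 | h1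
    · exact hPlt l (List.mem_of_mem_drop (List.mem_reverse.mp h1))
    · exact hPlt l h1
  · intro hne
    have hPne : Nat.digits 10 p ≠ [] := Nat.digits_ne_nil_iff_ne_zero.mpr hp0
    rw [pv_getLast_append' _ _ hPne hne]
    exact Nat.getLast_digit_ne_zero 10 hp0

theorem pv_mirror_mem {d p : Nat} (hd : 1 ≤ d)
    (hlo : 10 ^ ((d + 1) / 2 - 1) ≤ p) (hhi : p < 10 ^ ((d + 1) / 2)) :
    10 ^ (d - 1) ≤ pvMirror d p ∧ pvMirror d p < 10 ^ d ∧ pvPalNat (pvMirror d p) = true := by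
  have hh1 : 1 ≤ (d + 1) / 2 := by omega
  have hhd : (d + 1) / 2 ≤ d := by omega
  have hppos : 0 < (10:Nat) ^ ((d + 1) / 2 - 1) := Nat.pow_pos (by norm_num)
  have hp0 : p ≠ 0 := by omega
  have hlen : (Nat.digits 10 p).length = (d + 1) / 2 := pv_digitsLen_eq hlo hhi hh1
  have hdig := pv_mirror_digits hd hlo hhi
  have hlenM : (Nat.digits 10 (pvMirror d p)).length = d := by
    rw [hdig, List.length_append, List.length_reverse, List.length_drop, hlen]; omega
  have hPne : Nat.digits 10 p ≠ [] := Nat.digits_ne_nil_iff_ne_zero.mpr hp0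
  have hM0 : pvMirror d p ≠ 0 := by
    intro e
    rw [e] at hdig
    simp only [Nat.digits_zero] at hdig
    exact hPne (List.append_eq_nil_iff.mp hdig.symm).2
  refine ⟨pv_le_of_digitsLen hM0 hlenM, pv_lt_of_digitsLen hlenM, ?_⟩
  rw [pvPalNat, decide_eq_true_eq, hdig]
  have htake : ((Nat.digits 10 p).take (2 * ((d + 1) / 2) - d)).reverse
      = (Nat.digits 10 p).take (2 * ((d + 1) / 2) - d) := by
    apply pv_take_reverse_self
    rw [List.length_take]
    omega
  exact (pv_palrev (Nat.digits 10 p) (2 * ((d + 1) / 2) - d) htake).symm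



theorem pv_mirror_surj {d m : Nat} (hd : 1 ≤ d)
    (hlo : 10 ^ (d - 1) ≤ m) (hhi : m < 10 ^ d) (hpal : pvPalNat m = true) :
    ∃ p, 10 ^ ((d + 1) / 2 - 1) ≤ p ∧ p < 10 ^ ((d + 1) / 2) ∧ pvMirror d p = m := by
  have hh1 : 1 ≤ (d + 1) / 2 := by omega
  have hhd : (d + 1) / 2 ≤ d := by omega
  have hmpos : 0 < (10:Nat) ^ (d - 1) := Nat.pow_pos (by norm_num)
  have hm0 : m ≠ 0 := by omega
  have hlen : (Nat.digits 10 m).length = d := pv_digitsLen_eq hlo hhi hd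
  have hpal' : Nat.digits 10 m = (Nat.digits 10 m).reverse := by
    rw [pvPalNat, decide_eq_true_eq] at hpal; exact hpal
  refine ⟨m / 10 ^ (d - (d + 1) / 2), ?_, ?_, ?_⟩ <;>
    [skip; skip; skip]
  case _ =>
    have hpd : Nat.digits 10 (m / 10 ^ (d - (d + 1) / 2)) = (Nat.digits 10 m).drop (d - (d + 1) / 2) :=
      pv_digits_div_pow m (d - (d + 1) / 2)
    have hplen : (Nat.digits 10 (m / 10 ^ (d - (d + 1) / 2))).length = (d + 1) / 2 := by
      rw [hpd, List.length_drop, hlen]; omega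
    have hp0 : m / 10 ^ (d - (d + 1) / 2) ≠ 0 := by
      intro e; rw [e] at hplen; simp at hplen; omega
    exact pv_le_of_digitsLen hp0 hplen
  case _ =>
    have hpd : Nat.digits 10 (m / 10 ^ (d - (d + 1) / 2)) = (Nat.digits 10 m).drop (d - (d + 1) / 2) :=
      pv_digits_div_pow m (d - (d + 1) / 2)
    have hplen : (Nat.digits 10 (m / 10 ^ (d - (d + 1) / 2))).length = (d + 1) / 2 := by
      rw [hpd, List.length_drop, hlen]; omega
    exact pv_lt_of_digitsLen hplen
  case _ =>
    have hpd : Nat.digits 10 (m / 10 ^ (d - (d + 1) / 2)) = (Nat.digits 10 m).drop (d - (d + 1) / 2) :=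
      pv_digits_div_pow m (d - (d + 1) / 2)
    have hq : Nat.digits 10 (m / 10 ^ (d - (d + 1) / 2) / 10 ^ (2 * ((d + 1) / 2) - d)) =
        (Nat.digits 10 m).drop ((d + 1) / 2) := by
      rw [pv_digits_div_pow _ (2 * ((d + 1) / 2) - d), hpd, List.drop_drop]
      congr 1
      omega
    have htk : (Nat.digits 10 m).take (d - (d + 1) / 2) = ((Nat.digits 10 m).drop ((d + 1) / 2)).reverse := by
      rw [List.reverse_drop, ← hpal', hlen]
    have hsplit : m = Nat.ofDigits 10 ((Nat.digits 10 m).take (d - (d + 1) / 2))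
        + 10 ^ (d - (d + 1) / 2) * (m / 10 ^ (d - (d + 1) / 2)) := by
      conv_lhs => rw [← Nat.ofDigits_digits 10 m]
      conv_lhs => rw [← List.take_append_drop (d - (d + 1) / 2) (Nat.digits 10 m)]
      rw [Nat.ofDigits_append, List.length_take, hlen, Nat.min_eq_left (by omega), ← hpd,
        Nat.ofDigits_digits]
    rw [pvMirror, hq, ← htk]
    conv_rhs => rw [hsplit]
    ring


theorem pv_mirror_mono {d p q : Nat} (hd : 1 ≤ d) (hq : q < 10 ^ ((d + 1) / 2)) (hpq : p < q) :
    pvMirror d p < pvMirror d q := by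
  have hplt : p < 10 ^ ((d + 1) / 2) := lt_trans hpq hq
  have hdivlt : p / 10 ^ (2 * ((d + 1) / 2) - d) < 10 ^ (d - (d + 1) / 2) := by
    rw [Nat.div_lt_iff_lt_mul (Nat.pow_pos (by norm_num))]
    calc p < 10 ^ ((d + 1) / 2) := hplt
      _ = 10 ^ (d - (d + 1) / 2) * 10 ^ (2 * ((d + 1) / 2) - d) := by
          rw [← pow_add]; congr 1; omega
  have hlenle : (Nat.digits 10 (p / 10 ^ (2 * ((d + 1) / 2) - d))).length ≤ d - (d + 1) / 2 :=
    pv_digitsLen_le hdivlt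
  have hR : Nat.ofDigits 10 ((Nat.digits 10 (p / 10 ^ (2 * ((d + 1) / 2) - d))).reverse)
      < 10 ^ (d - (d + 1) / 2) := by
    calc Nat.ofDigits 10 ((Nat.digits 10 (p / 10 ^ (2 * ((d + 1) / 2) - d))).reverse)
        < 10 ^ ((Nat.digits 10 (p / 10 ^ (2 * ((d + 1) / 2) - d))).reverse).length :=
          Nat.ofDigits_lt_base_pow_length (by norm_num)
            (fun x hx => Nat.digits_lt_base (by norm_num) (List.mem_reverse.mp hx))
      _ ≤ 10 ^ (d - (d + 1) / 2) := by
          apply Nat.pow_le_pow_right (by norm_num)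
          rw [List.length_reverse]; exact hlenle
  have h1 : pvMirror d p < (p + 1) * 10 ^ (d - (d + 1) / 2) := by
    rw [pvMirror]
    have : (p + 1) * 10 ^ (d - (d + 1) / 2) = p * 10 ^ (d - (d + 1) / 2) + 10 ^ (d - (d + 1) / 2) := by ring
    omega
  have h2 : (p + 1) * 10 ^ (d - (d + 1) / 2) ≤ q * 10 ^ (d - (d + 1) / 2) :=
    Nat.mul_le_mul_right _ (by omega)
  have h3 : q * 10 ^ (d - (d + 1) / 2) ≤ pvMirror d q := by
    rw [pvMirror]; omega
  omega

theorem pv_block_eq (d : Nat) (hd : 1 ≤ d) :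
    (List.range' (10 ^ (d - 1)) (10 ^ d - 10 ^ (d - 1))).filter pvPalNat = pvBlockNat d := by
  have hmono1 : (10:Nat) ^ (d - 1) ≤ 10 ^ d := Nat.pow_le_pow_right (by norm_num) (by omega)
  have hmono2 : (10:Nat) ^ ((d + 1) / 2 - 1) ≤ 10 ^ ((d + 1) / 2) :=
    Nat.pow_le_pow_right (by norm_num) (by omega)
  have hP1 : ((List.range' (10 ^ (d - 1)) (10 ^ d - 10 ^ (d - 1))).filter pvPalNat).Pairwise (· < ·) :=
    List.Pairwise.sublist List.filter_sublist (List.pairwise_lt_range' 1)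
  have hP2 : (pvBlockNat d).Pairwise (· < ·) := by
    rw [pvBlockNat, List.pairwise_map]
    apply List.Pairwise.imp_of_mem (l := List.range' (10 ^ ((d + 1) / 2 - 1)) (10 ^ ((d + 1) / 2) - 10 ^ ((d + 1) / 2 - 1)))
      (fun {a b} ha hb hab => ?_) (List.pairwise_lt_range' 1)
    have hb' := (List.mem_range'_1.mp hb).2
    exact pv_mirror_mono hd (by omega) hab
  have hmem : ∀ x, x ∈ (List.range' (10 ^ (d - 1)) (10 ^ d - 10 ^ (d - 1))).filter pvPalNat ↔
      x ∈ pvBlockNat d := by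
    intro x
    rw [List.mem_filter, List.mem_range'_1, pvBlockNat, List.mem_map]
    constructor
    · rintro ⟨⟨hxlo, hxhi⟩, hxpal⟩
      obtain ⟨p, hplo, hphi, hpm⟩ := pv_mirror_surj hd hxlo (by omega) hxpal
      exact ⟨p, List.mem_range'_1.mpr ⟨hplo, by omega⟩, hpm⟩
    · rintro ⟨p, hp, rfl⟩
      obtain ⟨hplo, hphi⟩ := List.mem_range'_1.mp hp
      obtain ⟨hmlo, hmhi, hmpal⟩ := pv_mirror_mem hd hplo (by omega)
      exact ⟨⟨hmlo, by omega⟩, hmpal⟩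
  have hnd1 : ((List.range' (10 ^ (d - 1)) (10 ^ d - 10 ^ (d - 1))).filter pvPalNat).Nodup :=
    hP1.imp (fun h => Nat.ne_of_lt h)
  have hnd2 : (pvBlockNat d).Nodup := hP2.imp (fun h => Nat.ne_of_lt h)
  exact PySem.List.eq_of_perm_of_pairwise_le_of_injective (fun x : Nat => x) (fun a b hab => hab)
    ((List.perm_ext_iff_of_nodup hnd1 hnd2).mpr hmem)
    (hP1.imp le_of_lt) (hP2.imp le_of_lt)

theorem pv_blocks_flatten (K : Nat) :
    ((List.range' 1 K).map pvBlockNat).flatten =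
      (List.range' 1 (10 ^ K - 1)).filter pvPalNat := by
  induction K with
  | zero => simp
  | succ K ih =>
    have h1 : 0 < (10:Nat) ^ K := Nat.pow_pos (by norm_num)
    have h2 : (10:Nat) ^ K ≤ 10 ^ (K + 1) := Nat.pow_le_pow_right (by norm_num) (by omega)
    have e2 := List.range'_append (s := 1) (m := 10 ^ K - 1) (n := 10 ^ (K + 1) - 10 ^ K) (step := 1)
    rw [show 1 + 1 * ((10:Nat) ^ K - 1) = 10 ^ K by omega,
      show ((10:Nat) ^ K - 1) + (10 ^ (K + 1) - 10 ^ K) = 10 ^ (K + 1) - 1 by omega] at e2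
    rw [← e2, List.filter_append, ← ih]
    rw [List.range'_concat, List.map_append, List.flatten_append]
    congr 1
    have := pv_block_eq (K + 1) (by omega)
    simp only [show (K + 1 : Nat) - 1 = K by omega] at this
    simp [this]
    rw [Nat.add_comm]

theorem pv_length_le_sum (l : List Nat) (h : ∀ x ∈ l, 1 ≤ x) : l.length ≤ l.sum := by
  induction l with
  | nil => simp
  | cons a t ih =>
    simp only [List.length_cons, List.sum_cons]
    have h1 := h a (by simp)
    have h2 := ih (fun x hx => h x (by simp [hx]))
    omega

theorem pv_count_ge (K : Nat) :
    K ≤ ((List.range' 1 (10 ^ K - 1)).filter pvPalNat).length := by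
  rw [← pv_blocks_flatten K, List.length_flatten, List.map_map]
  have hlen : ((List.range' 1 K).map (List.length ∘ pvBlockNat)).length = K := by
    rw [List.length_map, List.length_range']
  calc K = ((List.range' 1 K).map (List.length ∘ pvBlockNat)).length := hlen.symm
    _ ≤ ((List.range' 1 K).map (List.length ∘ pvBlockNat)).sum := by
        apply pv_length_le_sum
        intro x hx
        obtain ⟨dd, hdd, rfl⟩ := List.mem_map.mp hx
        obtain ⟨hd1, _⟩ := List.mem_range'_1.mp hdd
        have hlt : (10:Nat) ^ ((dd + 1) / 2 - 1) < 10 ^ ((dd + 1) / 2) :=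
          Nat.pow_lt_pow_right (by norm_num) (by omega)
        simp only [Function.comp_apply, pvBlockNat, List.length_map, List.length_range']
        omega

-- ---- bridging A's string test to the digit test ----
theorem pv_toDigitsCore_eq (fuel : Nat) : ∀ (n : Nat) (acc : List Char), 0 < n → n ≤ fuel →
    Nat.toDigitsCore 10 fuel n acc = ((Nat.digits 10 n).map Nat.digitChar).reverse ++ acc := by
  induction fuel with
  | zero => intro n acc h1 h2; omega
  | succ f ih =>
    intro n acc h1 h2
    rw [Nat.toDigitsCore]
    by_cases hnd : n / 10 = 0
    · rw [if_pos hnd]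
      rw [Nat.digits_def' (by norm_num) h1, hnd]
      simp
    · rw [if_neg hnd]
      have hlt : n / 10 < n := Nat.div_lt_self h1 (by norm_num)
      rw [ih (n / 10) _ (Nat.pos_of_ne_zero hnd) (by omega)]
      rw [Nat.digits_def' (by norm_num) h1]
      simp

theorem pv_toDigits_eq (m : Nat) (hm : 0 < m) :
    Nat.toDigits 10 m = ((Nat.digits 10 m).map Nat.digitChar).reverse := by
  rw [Nat.toDigits]
  rw [pv_toDigitsCore_eq (m + 1) m [] hm (by omega)]
  simp

theorem pv_digitChar_toNat {a : Nat} (ha : a < 10) : (Nat.digitChar a).toNat = 48 + a := by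
  interval_cases a <;> rfl

theorem pv_digitChar_inj {a b : Nat} (ha : a < 10) (hb : b < 10)
    (h : Nat.digitChar a = Nat.digitChar b) : a = b := by
  have := congrArg Char.toNat h
  rw [pv_digitChar_toNat ha, pv_digitChar_toNat hb] at this
  omega

theorem pv_map_digitChar_inj : ∀ (L1 L2 : List Nat), (∀ x ∈ L1, x < 10) → (∀ x ∈ L2, x < 10) →
    L1.map Nat.digitChar = L2.map Nat.digitChar → L1 = L2 := by
  intro L1
  induction L1 with
  | nil => intro L2 _ _ h; cases L2 with
    | nil => rfl
    | cons b t => simp at h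
  | cons a t ih =>
    intro L2 h1 h2 h
    cases L2 with
    | nil => simp at h
    | cons b t2 =>
      simp only [List.map_cons, List.cons.injEq] at h
      have ha := pv_digitChar_inj (h1 a (by simp)) (h2 b (by simp)) h.1
      have ht := ih t2 (fun x hx => h1 x (by simp [hx])) (fun x hx => h2 x (by simp [hx])) h.2
      rw [ha, ht]

theorem pv_ofList_inj {l l' : List Char} : String.ofList l = String.ofList l' ↔ l = l' := by
  constructor
  · intro h
    have := congrArg String.toList h
    simpa [String.toList_ofList] using this
  · intro h; rw [h]

theorem pv_isPalindrome_natCast (m : Nat) (hm : 0 < m) :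
    pvIsPalindrome (m : Int) = pvPalNat m := by
  have hchars : PySem.Int.toChars (m : Int) = Nat.toDigits 10 m := by
    rw [PySem.Int.toChars]
    rw [if_neg (by exact not_lt.mpr (Int.natCast_nonneg m))]
    rw [Int.toNat_natCast]
  rw [pvIsPalindrome, pvPalNat]
  rw [PySem.Str.slice?_none_none_neg_one, Option.getD_some]
  rw [show PySem.Int.toStr (m : Int) = String.ofList (Nat.toDigits 10 m) by
    rw [PySem.Int.toStr, hchars]]
  rw [String.toList_ofList]
  rw [Bool.eq_iff_iff, beq_iff_eq, decide_eq_true_eq, pv_ofList_inj]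
  rw [pv_toDigits_eq m hm]
  rw [List.reverse_reverse]
  set D := Nat.digits 10 m with hD
  have hDlt : ∀ x ∈ D, x < 10 := fun x hx => Nat.digits_lt_base (by norm_num) hx
  constructor
  · intro h
    exact (pv_map_digitChar_inj D.reverse D (fun x hx => hDlt x (List.mem_reverse.mp hx)) hDlt
      (by rw [List.map_reverse, h])).symm
  · intro h
    rw [← List.map_reverse, ← h]

-- ---- bridging B's helpers ----
theorem pv_rev10_natCast (m : Nat) (r : Int) :
    pvRev10 (m : Int) r =
      ((Nat.ofDigits 10 ((Nat.digits 10 m).reverse) : Nat) : Int) +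
        r * 10 ^ (Nat.digits 10 m).length := by
  induction m using Nat.strong_induction_on generalizing r with
  | _ m ih =>
  rw [pvRev10]
  by_cases hm : 0 < m
  · rw [dif_pos (by exact_mod_cast hm)]
    have e1 : PySem.Int.floordiv (m : Int) 10 = ((m / 10 : Nat) : Int) := by
      exact_mod_cast PySem.Int.floordiv_natCast m 10
    have e2 : PySem.Int.mod (m : Int) 10 = ((m % 10 : Nat) : Int) := by
      exact_mod_cast PySem.Int.mod_natCast m 10
    rw [e1, e2, ih (m / 10) (Nat.div_lt_self hm (by norm_num))]
    rw [Nat.digits_def' (by norm_num) hm]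
    rw [List.reverse_cons, Nat.ofDigits_append, Nat.ofDigits_singleton]
    simp only [List.length_reverse, List.length_cons]
    push_cast
    ring
  · rw [dif_neg (by exact_mod_cast hm)]
    have : m = 0 := by omega
    subst this
    simp

theorem pv_pyRange_natCast (a b : Nat) :
    PySem.List.pyRange (a : Int) (b : Int) 1 = (List.range' a (b - a)).map (fun m : Nat => (m : Int)) := by
  rw [PySem.List.pyRange_one]
  rw [show (((b : Int)) - (a : Int)).toNat = b - a from Int.toNat_sub b a]
  rw [List.range'_eq_map_range, List.map_map]
  refine List.map_congr_left fun k _ => ?_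
  simp only [Function.comp_apply]
  push_cast
  ring

theorem pv_block_natCast (d : Nat) (hd : 1 ≤ d) :
    pvBlock (d : Int) = (pvBlockNat d).map (fun m : Nat => (m : Int)) := by
  have hh : PySem.Int.floordiv ((d : Int) + 1) 2 = (((d + 1) / 2 : Nat) : Int) := by
    rw [show ((d : Int) + 1) = (((d + 1 : Nat)) : Int) by push_cast; ring]
    exact_mod_cast PySem.Int.floordiv_natCast (d + 1) 2
  have hhd : (d + 1) / 2 ≤ d := by omega
  rw [pvBlock]
  simp only [hh]
  have t1 : ((((d + 1) / 2 : Nat) : Int) - 1).toNat = (d + 1) / 2 - 1 := by omega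
  have t2 : ((((d + 1) / 2 : Nat) : Int)).toNat = (d + 1) / 2 := by omega
  have t3 : (((d : Int)) - (((d + 1) / 2 : Nat) : Int)).toNat = d - (d + 1) / 2 := by omega
  have t4 : (2 * (((d + 1) / 2 : Nat) : Int) - (d : Int)).toNat = 2 * ((d + 1) / 2) - d := by omega
  rw [t1, t2, t3, t4]
  rw [show ((10 : Int)) ^ ((d + 1) / 2 - 1) = (((10 ^ ((d + 1) / 2 - 1) : Nat)) : Int) by push_cast; ring]
  rw [show ((10 : Int)) ^ ((d + 1) / 2) = (((10 ^ ((d + 1) / 2) : Nat)) : Int) by push_cast; ring]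
  rw [pv_pyRange_natCast, List.map_map]
  rw [pvBlockNat, List.map_map]
  refine List.map_congr_left fun p _ => ?_
  simp only [Function.comp_apply]
  have ef : PySem.Int.floordiv ((p : Int)) ((10 : Int) ^ (2 * ((d + 1) / 2) - d)) =
      (((p / 10 ^ (2 * ((d + 1) / 2) - d)) : Nat) : Int) := by
    rw [show ((10 : Int)) ^ (2 * ((d + 1) / 2) - d) = (((10 ^ (2 * ((d + 1) / 2) - d) : Nat)) : Int) by
      push_cast; ring]
    exact_mod_cast PySem.Int.floordiv_natCast p (10 ^ (2 * ((d + 1) / 2) - d))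
  rw [ef, pv_rev10_natCast]
  rw [pvMirror]
  push_cast
  ring

-- ---- closed forms for the two loops ----
theorem pv_aloop_eq (fuel : Nat) : ∀ (acc : List Int) (num n : Int),
    pvALoop fuel acc num n =
      if n ≤ (acc.length : Int) then acc
      else acc ++ (((PySem.List.pyRange num (num + fuel) 1).filter pvIsPalindrome).take
        (n - acc.length).toNat) := by
  induction fuel with
  | zero =>
    intro acc num n
    rw [pvALoop, PySem.List.pyRange_one_eq_nil (by simp)]
    simp
  | succ f ih =>
    intro acc num n
    rw [pvALoop]
    by_cases hlt : (acc.length : Int) < n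
    · rw [if_pos hlt]
      rw [show ((((f + 1 : Nat)) : Int)) = (f : Int) + 1 by push_cast; ring]
      rw [show num + ((f : Int) + 1) = (num + 1) + (f : Int) by ring]
      rw [PySem.List.pyRange_one_cons (by omega)]
      rw [show num + 1 + (f : Int) = (num + 1) + (f : Int) by ring]
      simp only [List.filter_cons]
      by_cases hpal : pvIsPalindrome num = true
      · simp only [if_pos hpal]
        rw [ih]
        have hlen : (((acc ++ [num]).length : Nat) : Int) = (acc.length : Int) + 1 := by
          simp
        rw [hlen]
        have htk : (n - (acc.length : Int)).toNat = (n - ((acc.length : Int) + 1)).toNat + 1 := by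
          omega
        rw [htk, List.take_succ_cons]
        by_cases h2 : n ≤ (acc.length : Int) + 1
        · rw [if_pos h2, if_neg (by omega)]
          have : (n - ((acc.length : Int) + 1)).toNat = 0 := by omega
          rw [this]; simp
        · rw [if_neg h2, if_neg (by omega)]
          rw [List.append_assoc, List.cons_append, List.nil_append]
      · simp only [if_neg hpal]
        rw [ih, if_neg (by omega)]
    · rw [if_neg hlt, if_pos (by omega)]

theorem pv_bloop_take (fuel : Nat) : ∀ (out : List Int) (length n : Int),
    (pvBLoop fuel out length n).take n.toNat =
      (out ++ ((PySem.List.pyRange length (length + fuel) 1).map pvBlock).flatten).take n.toNat := by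
  induction fuel with
  | zero =>
    intro out length n
    rw [pvBLoop, PySem.List.pyRange_one_eq_nil (by simp)]
    simp
  | succ f ih =>
    intro out length n
    rw [pvBLoop]
    by_cases hlt : (out.length : Int) < n
    · rw [if_pos hlt]
      rw [show ((((f + 1 : Nat)) : Int)) = (f : Int) + 1 by push_cast; ring]
      rw [show length + ((f : Int) + 1) = (length + 1) + (f : Int) by ring]
      rw [PySem.List.pyRange_one_cons (by omega)]
      rw [ih]
      simp only [List.map_cons, List.flatten_cons]
      rw [List.append_assoc]
    · rw [if_neg hlt]
      rw [List.take_append_of_le_length (by omega)]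

-- ===== VERDICT (by name: the statement is the Claim_ definition above) =====
theorem generate_first_n_palindromes_spec : Claim_equal_generate_first_n_palindromes := by
  intro n _
  unfold Spec_generate_first_n_palindromes
  rw [generate_first_n_palindromes, generate_first_n_palindromes_alt]
  by_cases hn : n ≤ 0
  · rw [pv_aloop_eq, if_pos (by simpa using hn)]
    rw [show n.toNat + 1 = 0 + 1 from by omega]
    rw [pvBLoop, if_neg (by simp; omega)]
    simp [PySem.List.slice]
  · replace hn : 0 < n := by omega
    set N := n.toNat with hNdef
    set F := 100 ^ (N + 1) - 1 with hFdef
    -- A side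
    rw [pv_aloop_eq, if_neg (by simp; omega)]
    simp only [List.length_nil, Nat.cast_zero, sub_zero, List.nil_append]
    have e := pv_pyRange_natCast 1 (1 + F)
    push_cast at e
    rw [show 1 + F - 1 = F from by omega] at e
    rw [e, List.filter_map]
    rw [List.filter_congr (fun m hm => by
      have h1 := (List.mem_range'_1.mp hm).1
      simpa [Function.comp] using pv_isPalindrome_natCast m (by omega))]
    rw [← List.map_take]
    -- B side
    rw [PySem.List.slice_to _ (by omega : (0 : Int) ≤ n)]
    rw [pv_bloop_take]
    simp only [List.nil_append]
    have e2 := pv_pyRange_natCast 1 (1 + (N + 1))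
    rw [show 1 + (N + 1) - 1 = N + 1 from by omega] at e2
    rw [show ((1 : Nat) : Int) = (1 : Int) from by norm_num] at e2
    rw [show (1 : Int) + ((N + 1 : Nat) : Int) = (((1 + (N + 1) : Nat)) : Int) from by push_cast; ring]
    rw [e2, List.map_map]
    rw [List.map_congr_left (l := List.range' 1 (N + 1))
      (f := pvBlock ∘ fun m : Nat => (m : Int))
      (g := fun dd => (pvBlockNat dd).map (fun m : Nat => (m : Int)))
      (fun dd hdd => by
        have h1 := (List.mem_range'_1.mp hdd).1
        simpa [Function.comp] using pv_block_natCast dd (by omega))]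
    rw [show (fun dd => (pvBlockNat dd).map (fun m : Nat => (m : Int)))
        = (List.map (fun m : Nat => (m : Int)) ∘ pvBlockNat) from rfl]
    rw [← List.map_map, ← List.map_flatten, ← List.map_take]
    congr 1
    rw [pv_blocks_flatten (N + 1)]
    have hFe : (100 : Nat) ^ (N + 1) = 10 ^ (2 * (N + 1)) := by
      rw [pow_mul]; norm_num
    have h10 : (10 : Nat) ^ (N + 1) ≤ 10 ^ (2 * (N + 1)) := Nat.pow_le_pow_right (by norm_num) (by omega)
    have h1p : 0 < (10 : Nat) ^ (N + 1) := Nat.pow_pos (by norm_num)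
    have e3 := List.range'_append (s := 1) (m := 10 ^ (N + 1) - 1)
      (n := 10 ^ (2 * (N + 1)) - 10 ^ (N + 1)) (step := 1)
    rw [show 1 + 1 * ((10 : Nat) ^ (N + 1) - 1) = 10 ^ (N + 1) from by omega,
      show ((10 : Nat) ^ (N + 1) - 1) + (10 ^ (2 * (N + 1)) - 10 ^ (N + 1)) = 10 ^ (2 * (N + 1)) - 1
        from by omega] at e3
    rw [hFdef, hFe, ← e3, List.filter_append]
    rw [List.take_append_of_le_length (le_trans (by omega) (pv_count_ge (N + 1)))]
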